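-- pv_equiv track=rewrite | github.com/zzakjista/apple_game_agent | environment/environment.py | check_cells_shape
-- ===== SOURCE A (Python) =====
-- from typing import List, Tuple
--
-- def check_cells_shape(cells: List[Tuple[int, int]]) -> bool:
--     """
--     선택된 셀이 직선(가로/세로) 또는 2x2 이상 직사각형인지 판별합니다.
--     ㄱ자(꺾인) 모양 등은 허용하지 않습니다.
--     """
--     if not cells:
--         return False
--     rows = sorted(set(r for r, c in cells))
--     cols = sorted(set(c for r, c in cells))
--     # 직선(가로 또는 세로)
--     if len(rows) == 1:
--         # 한 행에 여러 열: 가로 직선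
--         if len(cols) == len(cells):
--             return True
--         else:
--             return False
--     if len(cols) == 1:
--         # 한 열에 여러 행: 세로 직선
--         if len(rows) == len(cells):
--             return True
--         else:
--             return False
--     # 2x2 이상 직사각형
--     min_r, max_r = rows[0], rows[-1]
--     min_c, max_c = cols[0], cols[-1]
--     rect_cells = set((r, c) for r in range(min_r, max_r+1) for c in range(min_c, max_c+1))
--     if len(cells) == len(rect_cells) and (max_r-min_r+1 >= 2 and max_c-min_c+1 >= 2):
--         if set(cells) == rect_cells:
--             return True
--     return False
-- ===== SOURCE B (Python) =====
-- from typing import List, Tuple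
--
-- def check_cells_shape(cells: List[Tuple[int, int]]) -> bool:
--     # O(n): distinctness + bounding-box area count, no rectangle materialization, no sorting.
--     if not cells:
--         return False
--     if len(set(cells)) != len(cells):
--         return False
--     rows = {r for r, c in cells}
--     cols = {c for r, c in cells}
--     if len(rows) == 1 or len(cols) == 1:
--         return True
--     return (max(rows) - min(rows) + 1) * (max(cols) - min(cols) + 1) == len(cells)
-- ===== Notes on version B (the rewrite author's own statement) =====
-- stated objective: faster
-- what changed: B replaces A's sorting of rows/cols and materialization of the whole bounding-box rectangle as a set with a single distinctness check plus an arithmetic comparison of the cell count against the bounding-box area.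
import Mathlib
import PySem

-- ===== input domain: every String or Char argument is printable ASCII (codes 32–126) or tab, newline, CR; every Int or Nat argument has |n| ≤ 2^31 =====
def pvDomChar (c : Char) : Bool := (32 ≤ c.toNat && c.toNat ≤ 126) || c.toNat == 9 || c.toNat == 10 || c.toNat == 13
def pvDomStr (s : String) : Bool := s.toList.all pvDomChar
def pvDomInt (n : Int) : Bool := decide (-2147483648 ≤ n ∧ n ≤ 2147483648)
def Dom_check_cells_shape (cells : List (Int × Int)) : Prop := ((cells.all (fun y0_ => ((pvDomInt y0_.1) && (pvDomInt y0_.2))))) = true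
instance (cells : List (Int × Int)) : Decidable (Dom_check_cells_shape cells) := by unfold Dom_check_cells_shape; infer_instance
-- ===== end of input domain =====

-- B replaces A's sorting and bounding-box materialization by an O(n) distinctness check
-- plus an arithmetic comparison of the cell count with the bounding-box area.

-- ===== PORT A =====
def check_cells_shape (cells : List (Int × Int)) : Bool :=
  if cells = [] then false
  else
    let rows := PySem.List.sorted (PySem.Set.ofList (cells.map (fun p => p.1))) (fun x => x) false
    let cols := PySem.List.sorted (PySem.Set.ofList (cells.map (fun p => p.2))) (fun x => x) false
    if rows.length = 1 then
      if cols.length = cells.length then true else false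
    else if cols.length = 1 then
      if rows.length = cells.length then true else false
    else
      let min_r := (PySem.List.pyGet? rows 0).getD 0
      let max_r := (PySem.List.pyGet? rows (-1)).getD 0
      let min_c := (PySem.List.pyGet? cols 0).getD 0
      let max_c := (PySem.List.pyGet? cols (-1)).getD 0
      -- set((r, c) for r in range(min_r, max_r+1) for c in range(min_c, max_c+1)):
      -- the generated pairs are pairwise distinct (proved in pvRect_nodup below), so the
      -- generated list already IS this set (PySem.Set.ofList would be the identity on it);
      -- it is used directly so that evaluation stays linear in the rectangle size.
      let rect_cells : PySem.Set (Int × Int) :=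
        (PySem.List.pyRange min_r (max_r + 1) 1).flatMap (fun r =>
          (PySem.List.pyRange min_c (max_c + 1) 1).map (fun q => (r, q)))
      if cells.length = rect_cells.length ∧ (2 ≤ max_r - min_r + 1 ∧ 2 ≤ max_c - min_c + 1) then
        if PySem.Set.equal (PySem.Set.ofList cells) rect_cells then true else false
      else false

-- ===== PORT B =====
def check_cells_shape_alt (cells : List (Int × Int)) : Bool :=
  if cells = [] then false
  else if (PySem.Set.ofList cells).length ≠ cells.length then false
  else
    let rows : PySem.Set Int := PySem.Set.ofList (cells.map (fun p => p.1))
    let cols : PySem.Set Int := PySem.Set.ofList (cells.map (fun p => p.2))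
    if rows.length = 1 ∨ cols.length = 1 then true
    else
      decide (((PySem.List.max? rows (fun x => x)).getD 0 - (PySem.List.min? rows (fun x => x)).getD 0 + 1)
            * ((PySem.List.max? cols (fun x => x)).getD 0 - (PySem.List.min? cols (fun x => x)).getD 0 + 1)
            = (cells.length : Int))

-- ===== PRECONDITION & SPEC =====
def Spec_check_cells_shape (cells : List (Int × Int)) (out : Bool) : Prop := out = check_cells_shape_alt cells
instance (cells : List (Int × Int)) (out : Bool) : Decidable (Spec_check_cells_shape cells out) := by unfold Spec_check_cells_shape; infer_instance

-- ===== CLAIM (what is proved, stated in full; the proofs are below) =====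
def Claim_equal_check_cells_shape : Prop := ∀ (cells : List (Int × Int)), Dom_check_cells_shape cells → Spec_check_cells_shape cells (check_cells_shape cells)

-- ===== LEMMAS AND PROOFS =====

def pvMin (xs : List Int) : Int := (PySem.List.min? (PySem.Set.ofList xs) (fun x => x)).getD 0
def pvMax (xs : List Int) : Int := (PySem.List.max? (PySem.Set.ofList xs) (fun x => x)).getD 0
def pvRect (a b c d : Int) : List (Int × Int) :=
  (PySem.List.pyRange a (b + 1) 1).flatMap (fun r =>
    (PySem.List.pyRange c (d + 1) 1).map (fun q => (r, q)))

theorem pv_ofList_ne_nil (xs : List Int) (h : xs ≠ []) : PySem.Set.ofList xs ≠ [] := by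
  obtain ⟨x, hx⟩ := List.exists_mem_of_ne_nil xs h
  intro hc
  have hm : x ∈ PySem.Set.ofList xs := (PySem.Set.mem_ofList _ _).mpr hx
  rw [hc] at hm
  exact absurd hm List.not_mem_nil

theorem pvMin_spec (xs : List Int) (h : xs ≠ []) : pvMin xs ∈ xs ∧ ∀ y ∈ xs, pvMin xs ≤ y := by
  have hS := pv_ofList_ne_nil xs h
  cases hmo : PySem.List.min? (PySem.Set.ofList xs) (fun x => x) with
  | none => exact absurd ((PySem.List.min?_eq_none_iff _ _).mp hmo) hS
  | some m =>
    have hmem := PySem.List.min?_mem hmo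
    have hmin := PySem.List.min?_isMin hmo
    unfold pvMin
    rw [hmo]
    simp only [Option.getD_some]
    exact ⟨(PySem.Set.mem_ofList _ _).mp hmem, fun y hy => hmin y ((PySem.Set.mem_ofList _ _).mpr hy)⟩

theorem pvMax_spec (xs : List Int) (h : xs ≠ []) : pvMax xs ∈ xs ∧ ∀ y ∈ xs, y ≤ pvMax xs := by
  have hS := pv_ofList_ne_nil xs h
  cases hmo : PySem.List.max? (PySem.Set.ofList xs) (fun x => x) with
  | none => exact absurd ((PySem.List.max?_eq_none_iff _ _).mp hmo) hS
  | some m =>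
    have hmem := PySem.List.max?_mem hmo
    have hmax := PySem.List.max?_isMax hmo
    unfold pvMax
    rw [hmo]
    simp only [Option.getD_some]
    exact ⟨(PySem.Set.mem_ofList _ _).mp hmem, fun y hy => hmax y ((PySem.Set.mem_ofList _ _).mpr hy)⟩

theorem pv_sorted_min (xs : List Int) (h : xs ≠ []) :
    (PySem.List.pyGet? (PySem.List.sorted (PySem.Set.ofList xs) (fun x => x) false) 0).getD 0 = pvMin xs := by
  have hS := pv_ofList_ne_nil xs h
  have hsne : PySem.List.sorted (PySem.Set.ofList xs) (fun x => x) false ≠ [] := by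
    intro hc
    exact hS ((PySem.List.sorted_eq_nil_iff _ _ _).mp hc)
  obtain ⟨m, t, hst⟩ := List.exists_cons_of_ne_nil hsne
  have h0 : PySem.List.pyGet? (PySem.List.sorted (PySem.Set.ofList xs) (fun x => x) false) 0 = some m := by
    have hn := PySem.List.pyGet?_natCast (PySem.List.sorted (PySem.Set.ofList xs) (fun x => x) false) 0
    norm_num at hn
    rw [hn, hst]
    rfl
  rw [h0, Option.getD_some]
  have hmle : ∀ y ∈ PySem.Set.ofList xs, m ≤ y := PySem.List.key_head_sorted_le _ _ hst
  have hmm : m ∈ xs := by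
    have hms : m ∈ PySem.List.sorted (PySem.Set.ofList xs) (fun x => x) false := by
      rw [hst]; exact List.mem_cons_self
    exact (PySem.Set.mem_ofList _ _).mp ((PySem.List.mem_sorted _ _ _ _).mp hms)
  obtain ⟨h1, h2⟩ := pvMin_spec xs h
  exact le_antisymm (hmle _ ((PySem.Set.mem_ofList _ _).mpr h1)) (h2 m hmm)

theorem pv_sorted_max (xs : List Int) (h : xs ≠ []) :
    (PySem.List.pyGet? (PySem.List.sorted (PySem.Set.ofList xs) (fun x => x) false) (-1)).getD 0 = pvMax xs := by
  have hS := pv_ofList_ne_nil xs h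
  have hsne : PySem.List.sorted (PySem.Set.ofList xs) (fun x => x) false ≠ [] := by
    intro hc
    exact hS ((PySem.List.sorted_eq_nil_iff _ _ _).mp hc)
  set s := PySem.List.sorted (PySem.Set.ofList xs) (fun x => x) false with hsdef
  have hlen : 1 ≤ s.length := List.length_pos_of_ne_nil hsne
  have hng : PySem.List.pyGet? s (-1) = s[s.length - 1]? := by
    unfold PySem.List.pyGet? PySem.List.pyIdx?
    rw [if_neg (by norm_num), if_pos (by omega)]
    norm_num
  have hg : s[s.length - 1]? = some (s.getLast hsne) := by
    rw [List.getLast_eq_getElem]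
    exact List.getElem?_eq_getElem (by omega)
  rw [hng, hg, Option.getD_some]
  have hmem : s.getLast hsne ∈ s := List.getLast_mem hsne
  have hp : s.Pairwise (fun x y => x < y) := PySem.List.sorted_ofList_pairwise_lt xs
  have hpr : s.reverse.Pairwise (fun a b => b < a) := List.pairwise_reverse.mpr hp
  have hrevne : s.reverse ≠ [] := by simpa using hsne
  obtain ⟨m', t', hrev⟩ := List.exists_cons_of_ne_nil hrevne
  have hm' : m' = s.getLast hsne := by
    have h1 : s.reverse.head? = some m' := by rw [hrev]; rfl
    rw [List.head?_reverse, List.getLast?_eq_some_getLast hsne] at h1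
    exact (Option.some_inj.mp h1).symm
  have hle : ∀ y ∈ s, y ≤ s.getLast hsne := by
    intro y hy
    have hyr : y ∈ s.reverse := List.mem_reverse.mpr hy
    rw [hrev] at hyr
    rcases List.mem_cons.mp hyr with hh | hh
    · rw [hh, hm']
    · have hlt := (List.pairwise_cons.mp (hrev ▸ hpr)).1 y hh
      rw [hm'] at hlt
      exact le_of_lt hlt
  obtain ⟨h1, h2⟩ := pvMax_spec xs h
  have hmx : s.getLast hsne ∈ xs := (PySem.Set.mem_ofList _ _).mp ((PySem.List.mem_sorted _ _ _ _).mp hmem)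
  have hmax : pvMax xs ∈ s := (PySem.List.mem_sorted _ _ _ _).mpr ((PySem.Set.mem_ofList _ _).mpr h1)
  exact le_antisymm (h2 _ hmx) (hle _ hmax)

theorem pv_min_lt_max (xs : List Int) (h2 : 2 ≤ (PySem.Set.ofList xs).length) : pvMin xs < pvMax xs := by
  have hxne : xs ≠ [] := by
    intro hc
    rw [hc] at h2
    simp [PySem.Set.ofList_nil] at h2
  obtain ⟨hm1, hm2⟩ := pvMin_spec xs hxne
  obtain ⟨hM1, hM2⟩ := pvMax_spec xs hxne
  rcases hS : PySem.Set.ofList xs with _ | ⟨a, _ | ⟨b, t⟩⟩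
  · rw [hS] at h2; simp at h2
  · rw [hS] at h2; simp at h2
  · have hnd : (PySem.Set.ofList xs).Nodup := PySem.Set.nodup_ofList xs
    rw [hS] at hnd
    have hab : a ≠ b := by
      intro hc
      exact (List.pairwise_cons.mp hnd).1 b (by simp) hc
    have haxs : a ∈ xs := (PySem.Set.mem_ofList _ _).mp (by rw [hS]; exact List.mem_cons_self)
    have hbxs : b ∈ xs := (PySem.Set.mem_ofList _ _).mp (by rw [hS]; simp)
    by_contra hlt
    rw [not_lt] at hlt
    exact hab (le_antisymm
      (le_trans (le_trans (hM2 a haxs) hlt) (hm2 b hbxs))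
      (le_trans (le_trans (hM2 b hbxs) hlt) (hm2 a haxs)))

theorem pv_foldl_add_map {α β : Type} [BEq α] [LawfulBEq α] [BEq β] [LawfulBEq β]
    (f : α → β) (hf : Function.Injective f) :
    ∀ (xs s : List α), List.foldl PySem.Set.add (s.map f) (xs.map f) = (List.foldl PySem.Set.add s xs).map f
  | [], s => rfl
  | x :: xs, s => by
      have hmem : (f x ∈ s.map f) ↔ x ∈ s := by
        simp only [List.mem_map]
        exact ⟨fun ⟨y, hy, he⟩ => hf he ▸ hy, fun h => ⟨x, h, rfl⟩⟩
      have hadd : PySem.Set.add (s.map f) (f x) = (PySem.Set.add s x).map f := by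
        rw [PySem.Set.add_eq_ite, PySem.Set.add_eq_ite]
        by_cases h : x ∈ s
        · rw [if_pos (hmem.mpr h), if_pos h]
        · rw [if_neg (fun hh => h (hmem.mp hh)), if_neg h, List.map_append]
          rfl
      show List.foldl PySem.Set.add (PySem.Set.add (s.map f) (f x)) (xs.map f)
          = (List.foldl PySem.Set.add (PySem.Set.add s x) xs).map f
      rw [hadd]
      exact pv_foldl_add_map f hf xs (PySem.Set.add s x)

theorem pv_ofList_map {α β : Type} [BEq α] [LawfulBEq α] [BEq β] [LawfulBEq β]
    (f : α → β) (hf : Function.Injective f) (xs : List α) :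
    PySem.Set.ofList (xs.map f) = (PySem.Set.ofList xs).map f := by
  rw [PySem.Set.ofList_eq_foldl, PySem.Set.ofList_eq_foldl]
  have h := pv_foldl_add_map f hf xs []
  simpa using h

theorem pv_len_row (cells : List (Int × Int)) (r0 : Int) (h : ∀ p ∈ cells, p.1 = r0) :
    (PySem.Set.ofList (cells.map (fun p => p.2))).length = (PySem.Set.ofList cells).length := by
  have hinj : Function.Injective (fun q : Int => ((r0, q) : Int × Int)) := by
    intro x y hxy
    simpa using hxy
  have h1 : (cells.map (fun p => p.2)).map (fun q => ((r0, q) : Int × Int)) = cells := by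
    rw [List.map_map]
    conv_rhs => rw [← List.map_id cells]
    exact List.map_congr_left (fun p hp => by
      obtain ⟨pr, pc⟩ := p
      have hq := h _ hp
      simp_all)
  conv_rhs => rw [← h1]
  rw [pv_ofList_map _ hinj, List.length_map]

theorem pv_len_col (cells : List (Int × Int)) (c0 : Int) (h : ∀ p ∈ cells, p.2 = c0) :
    (PySem.Set.ofList (cells.map (fun p => p.1))).length = (PySem.Set.ofList cells).length := by
  have hinj : Function.Injective (fun r : Int => ((r, c0) : Int × Int)) := by
    intro x y hxy
    simpa using hxy
  have h1 : (cells.map (fun p => p.1)).map (fun r => ((r, c0) : Int × Int)) = cells := by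
    rw [List.map_map]
    conv_rhs => rw [← List.map_id cells]
    exact List.map_congr_left (fun p hp => by
      obtain ⟨pr, pc⟩ := p
      have hq := h _ hp
      simp_all)
  conv_rhs => rw [← h1]
  rw [pv_ofList_map _ hinj, List.length_map]

theorem pvRect_mem (a b c d : Int) (p : Int × Int) :
    p ∈ pvRect a b c d ↔ (a ≤ p.1 ∧ p.1 ≤ b ∧ c ≤ p.2 ∧ p.2 ≤ d) := by
  obtain ⟨x, y⟩ := p
  unfold pvRect
  simp only [List.mem_flatMap, List.mem_map, PySem.List.mem_pyRange_one, Prod.mk.injEq]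
  constructor
  · rintro ⟨r, hr, q, hq, h1, h2⟩
    subst h1; subst h2
    exact ⟨hr.1, by omega, hq.1, by omega⟩
  · rintro ⟨h1, h2, h3, h4⟩
    exact ⟨x, ⟨h1, by omega⟩, y, ⟨h3, by omega⟩, rfl, rfl⟩

theorem pvRect_nodup (a b c d : Int) : (pvRect a b c d).Nodup := by
  unfold pvRect
  rw [List.nodup_flatMap]
  refine ⟨fun r _ => List.Nodup.map ?_ (PySem.List.nodup_pyRange_one _ _), ?_⟩
  · intro x y hxy
    simpa using hxy
  · have h2 : List.Pairwise (fun r1 r2 => r1 ≠ r2) (PySem.List.pyRange a (b + 1) 1) :=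
      PySem.List.nodup_pyRange_one a (b + 1)
    refine List.Pairwise.imp ?_ h2
    intro r1 r2 hne p hp1 hp2
    simp only [List.mem_map] at hp1 hp2
    obtain ⟨q1, _, he1⟩ := hp1
    obtain ⟨q2, _, he2⟩ := hp2
    apply hne
    have he := he1.trans he2.symm
    exact (Prod.mk.injEq _ _ _ _ ▸ he).1

theorem pvRect_length (a b c d : Int) :
    (pvRect a b c d).length = (b + 1 - a).toNat * (d + 1 - c).toNat := by
  unfold pvRect
  rw [List.length_flatMap]
  simp [PySem.List.length_pyRange_one]

theorem pv_rect_case (cells : List (Int × Int)) (a b c d : Int)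
    (hb : ∀ p ∈ cells, a ≤ p.1 ∧ p.1 ≤ b ∧ c ≤ p.2 ∧ p.2 ≤ d)
    (hab : a ≤ b) (hcd : c ≤ d) :
    (cells.length = (pvRect a b c d).length ∧
      PySem.Set.equal (PySem.Set.ofList cells) (pvRect a b c d) = true)
    ↔ ((PySem.Set.ofList cells).length = cells.length ∧
        (b - a + 1) * (d - c + 1) = (cells.length : Int)) := by
  have hlen : ((pvRect a b c d).length : Int) = (b - a + 1) * (d - c + 1) := by
    rw [pvRect_length]
    push_cast [Int.toNat_of_nonneg (by omega : (0:Int) ≤ b + 1 - a),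
               Int.toNat_of_nonneg (by omega : (0:Int) ≤ d + 1 - c)]
    ring
  have hsub : (PySem.Set.ofList cells) ⊆ pvRect a b c d := by
    intro p hp
    exact (pvRect_mem a b c d p).mpr (hb p ((PySem.Set.mem_ofList _ _).mp hp))
  have hnd : (PySem.Set.ofList cells).Nodup := PySem.Set.nodup_ofList cells
  constructor
  · rintro ⟨h1, h2⟩
    have hiff := (PySem.Set.equal_iff _ _).mp h2
    have hperm : (PySem.Set.ofList cells).Perm (pvRect a b c d) :=
      (List.perm_ext_iff_of_nodup hnd (pvRect_nodup a b c d)).mpr hiff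
    have hl := hperm.length_eq
    refine ⟨by omega, ?_⟩
    rw [← hlen]
    exact_mod_cast h1.symm
  · rintro ⟨h1, h2⟩
    have h1' : cells.length = (pvRect a b c d).length := by
      have hc : ((cells.length : Int)) = ((pvRect a b c d).length : Int) := by rw [← h2, hlen]
      exact_mod_cast hc
    refine ⟨h1', ?_⟩
    have hsp : (PySem.Set.ofList cells).Subperm (pvRect a b c d) := hnd.subperm hsub
    have hperm := hsp.perm_of_length_le (by omega)
    rw [PySem.Set.equal_iff]
    exact fun x => hperm.mem_iff

theorem pvRect_def (a b c d : Int) :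
    (PySem.List.pyRange a (b + 1) 1).flatMap (fun r =>
      (PySem.List.pyRange c (d + 1) 1).map (fun q => (r, q)))
    = pvRect a b c d := rfl

theorem pv_main (cells : List (Int × Int)) : check_cells_shape cells = check_cells_shape_alt cells := by
  by_cases hnil : cells = []
  · simp [check_cells_shape, check_cells_shape_alt, hnil]
  · have hrsne : cells.map (fun p : Int × Int => p.1) ≠ [] := by simpa using hnil
    have hcsne : cells.map (fun p : Int × Int => p.2) ≠ [] := by simpa using hnil
    simp only [check_cells_shape, check_cells_shape_alt, PySem.List.length_sorted]
    rw [if_neg hnil, if_neg hnil]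
    by_cases hr : (PySem.Set.ofList (cells.map (fun p : Int × Int => p.1))).length = 1
    · -- all cells in one row
      obtain ⟨r0, hr0⟩ := List.length_eq_one_iff.mp hr
      have hall : ∀ p ∈ cells, p.1 = r0 := by
        intro p hp
        have hm : p.1 ∈ PySem.Set.ofList (cells.map (fun p : Int × Int => p.1)) :=
          (PySem.Set.mem_ofList _ _).mpr (List.mem_map.mpr ⟨p, hp, rfl⟩)
        rw [hr0] at hm
        simpa using hm
      have hcol := pv_len_row cells r0 hall
      rw [if_pos hr]
      by_cases hn : (PySem.Set.ofList cells).length = cells.length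
      · rw [if_pos (hcol.trans hn), if_neg (fun hx => hx hn), if_pos (Or.inl hr)]
      · rw [if_neg (fun hx => hn (hcol.symm.trans hx)), if_pos hn]
    · rw [if_neg hr]
      by_cases hc : (PySem.Set.ofList (cells.map (fun p : Int × Int => p.2))).length = 1
      · -- all cells in one column
        obtain ⟨c0, hc0⟩ := List.length_eq_one_iff.mp hc
        have hall : ∀ p ∈ cells, p.2 = c0 := by
          intro p hp
          have hm : p.2 ∈ PySem.Set.ofList (cells.map (fun p : Int × Int => p.2)) :=
            (PySem.Set.mem_ofList _ _).mpr (List.mem_map.mpr ⟨p, hp, rfl⟩)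
          rw [hc0] at hm
          simpa using hm
        have hcol := pv_len_col cells c0 hall
        rw [if_pos hc]
        by_cases hn : (PySem.Set.ofList cells).length = cells.length
        · rw [if_pos (hcol.trans hn), if_neg (fun hx => hx hn), if_pos (Or.inr hc)]
        · rw [if_neg (fun hx => hn (hcol.symm.trans hx)), if_pos hn]
      · -- true rectangle test
        rw [if_neg hc]
        rw [pv_sorted_min _ hrsne, pv_sorted_max _ hrsne,
            pv_sorted_min _ hcsne, pv_sorted_max _ hcsne, pvRect_def]
        have eB1 : (PySem.List.min? (PySem.Set.ofList (cells.map (fun p : Int × Int => p.1))) (fun x => x)).getD 0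
            = pvMin (cells.map (fun p : Int × Int => p.1)) := rfl
        have eB2 : (PySem.List.max? (PySem.Set.ofList (cells.map (fun p : Int × Int => p.1))) (fun x => x)).getD 0
            = pvMax (cells.map (fun p : Int × Int => p.1)) := rfl
        have eB3 : (PySem.List.min? (PySem.Set.ofList (cells.map (fun p : Int × Int => p.2))) (fun x => x)).getD 0
            = pvMin (cells.map (fun p : Int × Int => p.2)) := rfl
        have eB4 : (PySem.List.max? (PySem.Set.ofList (cells.map (fun p : Int × Int => p.2))) (fun x => x)).getD 0
            = pvMax (cells.map (fun p : Int × Int => p.2)) := rfl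
        rw [eB1, eB2, eB3, eB4]
        set A1 := pvMin (cells.map (fun p : Int × Int => p.1)) with hA1e
        set B1 := pvMax (cells.map (fun p : Int × Int => p.1)) with hB1e
        set C1 := pvMin (cells.map (fun p : Int × Int => p.2)) with hC1e
        set D1 := pvMax (cells.map (fun p : Int × Int => p.2)) with hD1e
        have hlen2r : 2 ≤ (PySem.Set.ofList (cells.map (fun p : Int × Int => p.1))).length := by
          have h1 : (PySem.Set.ofList (cells.map (fun p : Int × Int => p.1))).length ≠ 0 := by
            intro hz
            exact pv_ofList_ne_nil _ hrsne (List.length_eq_zero_iff.mp hz)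
          omega
        have hlen2c : 2 ≤ (PySem.Set.ofList (cells.map (fun p : Int × Int => p.2))).length := by
          have h1 : (PySem.Set.ofList (cells.map (fun p : Int × Int => p.2))).length ≠ 0 := by
            intro hz
            exact pv_ofList_ne_nil _ hcsne (List.length_eq_zero_iff.mp hz)
          omega
        have hab : A1 < B1 := pv_min_lt_max _ hlen2r
        have hcd : C1 < D1 := pv_min_lt_max _ hlen2c
        have hbnds : ∀ p ∈ cells, A1 ≤ p.1 ∧ p.1 ≤ B1 ∧ C1 ≤ p.2 ∧ p.2 ≤ D1 := by
          intro p hp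
          exact ⟨(pvMin_spec _ hrsne).2 p.1 (List.mem_map.mpr ⟨p, hp, rfl⟩),
                 (pvMax_spec _ hrsne).2 p.1 (List.mem_map.mpr ⟨p, hp, rfl⟩),
                 (pvMin_spec _ hcsne).2 p.2 (List.mem_map.mpr ⟨p, hp, rfl⟩),
                 (pvMax_spec _ hcsne).2 p.2 (List.mem_map.mpr ⟨p, hp, rfl⟩)⟩
        have hiff := pv_rect_case cells A1 B1 C1 D1 hbnds (le_of_lt hab) (le_of_lt hcd)
        have hdims : 2 ≤ B1 - A1 + 1 ∧ 2 ≤ D1 - C1 + 1 := ⟨by omega, by omega⟩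
        by_cases hS : (PySem.Set.ofList cells).length = cells.length
        · by_cases hA : (B1 - A1 + 1) * (D1 - C1 + 1) = (cells.length : Int)
          · obtain ⟨h1, h2⟩ := hiff.mpr ⟨hS, hA⟩
            simp [h1, h2, hdims.1, hdims.2, hS, hr, hc, hA]
          · by_cases h1 : cells.length = (pvRect A1 B1 C1 D1).length
            · have h2 : ¬((PySem.Set.ofList cells).equal (pvRect A1 B1 C1 D1) = true) :=
                fun h2 => hA (hiff.mp ⟨h1, h2⟩).2
              simp [h1, h2, hdims.1, hdims.2, hS, hr, hc]
              rw [← h1]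
              exact hA
            · simp [h1, hS, hA, hr, hc]
        · by_cases h1 : cells.length = (pvRect A1 B1 C1 D1).length
          · have h2 : ¬((PySem.Set.ofList cells).equal (pvRect A1 B1 C1 D1) = true) :=
              fun h2 => hS (hiff.mp ⟨h1, h2⟩).1
            simp [h1, h2, hdims.1, hdims.2, hr, hc]
            intro hx
            exact absurd (hx.trans h1.symm) hS
          · simp [h1, hS]

-- ===== VERDICT (by name: the statement is the Claim_ definition above) =====
theorem check_cells_shape_spec : Claim_equal_check_cells_shape := by
  intro cells _
  unfold Spec_check_cells_shape
  exact pv_main cells
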